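-- pv_equiv track=rewrite | github.com/BrandonBinf/python_scripts_mega_repo | malaria_project_scripts/old_scripts/scan4m6a.py | find_m6_motifs
-- ===== SOURCE A (Python) =====
-- def find_m6_motifs(orfs_data):
--     motif_coords = []
--     all_motifs = ["AAACA", "AAACC", "AAACU", "AGACA", "AGACC", "AGACU", "GAACA", "GAACC", "GAACU", "GGACA", "GGACC", "GGACU"] # all possible combos of the motif sequence: RRACH
--     for coords, sequence in orfs_data.items():
--         orf_start = int(coords[0])
--         orf_end = int(coords[1])
--         for motif in all_motifs:
--             index = 0 #search index
--             while True:
--                 rel_motif_start = sequence.find(motif, index)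
--                 if rel_motif_start == -1:
--                     break
--                 abs_motif_start = orf_start + rel_motif_start
--                 abs_motif_end = abs_motif_start + len(motif)
--                 motif_coords.append((abs_motif_start, abs_motif_end))
--                 index = rel_motif_start + 1
--     return motif_coords
-- ===== SOURCE B (Python) =====
-- def find_m6_motifs(orfs_data):
--     # One positional RRACH scan per sequence + grouping by 5-mer, instead of 12 str.find scans.
--     all_motifs = ["AAACA", "AAACC", "AAACU", "AGACA", "AGACC", "AGACU",
--                   "GAACA", "GAACC", "GAACU", "GGACA", "GGACC", "GGACU"]
--     motif_coords = []
--     for coords, sequence in orfs_data.items():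
--         orf_start = int(coords[0])
--         hits = []
--         for i in range(len(sequence) - 4):
--             if (sequence[i] in "AG" and sequence[i + 1] in "AG"
--                     and sequence[i + 2] == "A" and sequence[i + 3] == "C"
--                     and sequence[i + 4] in "ACU"):
--                 hits.append((sequence[i:i + 5], (orf_start + i, orf_start + i + 5)))
--         for motif in all_motifs:
--             for key, pair in hits:
--                 if key == motif:
--                     motif_coords.append(pair)
--     return motif_coords
-- ===== Notes on version B (the rewrite author's own statement) =====
-- stated objective: alternative
-- what changed: B replaces A's 12 repeated str.find re-scans per sequence with a single positional scan that tests the RRACH pattern at each index and buckets hits by their 5-mer, then emits the buckets in motif order to keep A's motif-grouped output order.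
import Mathlib
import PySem

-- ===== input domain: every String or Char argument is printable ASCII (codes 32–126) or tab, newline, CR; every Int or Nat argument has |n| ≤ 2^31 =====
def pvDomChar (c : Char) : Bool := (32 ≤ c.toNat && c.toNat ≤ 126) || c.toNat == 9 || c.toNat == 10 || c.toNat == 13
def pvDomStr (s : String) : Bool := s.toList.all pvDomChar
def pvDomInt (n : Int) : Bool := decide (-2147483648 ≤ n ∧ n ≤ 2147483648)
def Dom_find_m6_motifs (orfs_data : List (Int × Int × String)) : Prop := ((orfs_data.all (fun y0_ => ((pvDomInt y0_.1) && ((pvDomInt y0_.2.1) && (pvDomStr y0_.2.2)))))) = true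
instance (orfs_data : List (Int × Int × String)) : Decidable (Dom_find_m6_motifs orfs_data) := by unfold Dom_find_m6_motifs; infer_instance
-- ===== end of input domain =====

-- B replaces A's 12 repeated str.find scans per sequence by ONE positional RRACH scan that buckets
-- hits by their 5-mer and emits them grouped in motif order (objective: alternative decomposition).
-- orfs_data is a Python dict {(start, end): sequence}, modelled as the association list of its items.

-- the 12 RRACH motifs, shared verbatim by both Pythons
def pvMotifs : List String :=
  ["AAACA", "AAACC", "AAACU", "AGACA", "AGACC", "AGACU",
   "GAACA", "GAACC", "GAACU", "GGACA", "GGACC", "GGACU"]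

-- ===== PORT A =====
-- A's inner `while True: rel = sequence.find(motif, index) …` loop; `index` is always a Nat (starts
-- at 0, then rel+1).  The `index ≤ cs.length` guard is for termination only: past the end Python's
-- find returns -1 and the loop breaks, exactly what the guard's `else acc` returns.
def pvFindLoop (cs ms : List Char) (st : Int) (acc : List (Int × Int)) (index : Nat) :
    List (Int × Int) :=
  if hle : index ≤ cs.length then
    if hr : PySem.Chars.findFrom cs ms (index : Int) none = -1 then acc
    else
      pvFindLoop cs ms st
        (acc ++ [(st + PySem.Chars.findFrom cs ms (index : Int) none,
                  st + PySem.Chars.findFrom cs ms (index : Int) none + (ms.length : Int))])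
        ((PySem.Chars.findFrom cs ms (index : Int) none).toNat + 1)
  else acc
termination_by cs.length + 1 - index
decreasing_by
  have h := (PySem.Chars.findFrom_natCast_spec cs ms index hle hr).1
  omega

-- orf_start = int(coords[0]) is the identity on the Int key; orf_end is computed and unused.
def find_m6_motifs (orfs_data : List (Int × Int × String)) : List (Int × Int) :=
  orfs_data.foldl (fun mc c =>
    pvMotifs.foldl (fun mc2 m => pvFindLoop c.2.2.toList m.toList c.1 mc2 0) mc) []

-- ===== PORT B =====
def pvIsR (c : Char) : Bool := c == 'A' || c == 'G'        -- `c in "AG"` for a 1-char string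
def pvIsH (c : Char) : Bool := c == 'A' || c == 'C' || c == 'U'  -- `c in "ACU"`

-- the RRACH test on positions i..i+4; for i < len-4 all five accesses are in range, so getD is
-- exact for Python's sequence[i+k]
def pvRR (cs : List Char) (i : Nat) : Bool :=
  pvIsR (cs.getD i ' ') && pvIsR (cs.getD (i + 1) ' ') &&
  (cs.getD (i + 2) ' ' == 'A') && (cs.getD (i + 3) ' ' == 'C') && pvIsH (cs.getD (i + 4) ' ')

-- sequence[i:i+5] with 0 ≤ i is (drop i).take 5 (PySem.List.slice_natCast_add); range(len-4) with
-- len-4 < 0 is empty, matching Nat subtraction.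
def find_m6_motifs_alt (orfs_data : List (Int × Int × String)) : List (Int × Int) :=
  orfs_data.foldl (fun mc c =>
    let cs := c.2.2.toList
    let st := c.1
    let hits : List (List Char × (Int × Int)) :=
      (List.range (cs.length - 4)).foldl (fun h i =>
        if pvRR cs i then
          h ++ [((cs.drop i).take 5, (st + (i : Int), st + (i : Int) + 5))]
        else h) []
    pvMotifs.foldl (fun mc2 m =>
      hits.foldl (fun mc3 p => if p.1 == m.toList then mc3 ++ [p.2] else mc3) mc2) mc) []

-- ===== PRECONDITION & SPEC =====
-- Pre_ excludes lists whose (start, end) coordinate keys repeat: the Python argument is a dict, so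
-- duplicate keys collapse to a single entry and the association-list ports would see entries the
-- dict has discarded.
def Pre_find_m6_motifs (orfs_data : List (Int × Int × String)) : Prop :=
  (orfs_data.map (fun c => (c.1, c.2.1))).Nodup
instance (orfs_data : List (Int × Int × String)) : Decidable (Pre_find_m6_motifs orfs_data) := by
  unfold Pre_find_m6_motifs; infer_instance
def pvWitness_find_m6_motifs : (List (Int × Int × String)) := [(3, 9, "AAACAAACU")]
def Spec_find_m6_motifs (orfs_data : List (Int × Int × String)) (out : List (Int × Int)) : Prop :=
  out = find_m6_motifs_alt orfs_data
instance (orfs_data : List (Int × Int × String)) (out : List (Int × Int)) :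
    Decidable (Spec_find_m6_motifs orfs_data out) := by unfold Spec_find_m6_motifs; infer_instance

-- ===== CLAIM (what is proved, stated in full; the proofs are below) =====
def Claim_equal_find_m6_motifs : Prop := ∀ (orfs_data : List (Int × Int × String)),
  Dom_find_m6_motifs orfs_data → Pre_find_m6_motifs orfs_data →
  Spec_find_m6_motifs orfs_data (find_m6_motifs orfs_data)

-- ===== LEMMAS AND PROOFS =====

-- the ascending list of match positions of ms in cs from index i on (overlaps allowed)
def pvOccs (cs ms : List Char) (i : Nat) : List Nat :=
  if i + ms.length ≤ cs.length then
    (if (cs.drop i).take ms.length = ms then [i] else []) ++ pvOccs cs ms (i + 1)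
  else []
termination_by cs.length + 1 - i
decreasing_by omega

theorem pvOccs_nil (cs ms : List Char) (i : Nat) (h : ¬ ms <:+: cs.drop i) :
    pvOccs cs ms i = [] := by
  fun_induction pvOccs cs ms i with
  | case1 i hle ih =>
    have hsub : ¬ ms <:+: cs.drop (i + 1) := by
      intro hinf
      exact h (hinf.trans ((List.drop_drop (l := cs) (i := 1) (j := i)) ▸
        List.drop_suffix 1 (cs.drop i)).isInfix)
    have htake : ¬ (cs.drop i).take ms.length = ms := by
      intro he
      exact h ((he ▸ List.take_prefix ms.length (cs.drop i)).isInfix)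
    simp [htake, ih hsub]
  | case2 i hle => rfl

theorem pvOccs_cons (cs ms : List Char) (p : Nat) (hplen : p + ms.length ≤ cs.length)
    (hp : ms <+: cs.drop p) :
    ∀ i, i ≤ p → (∀ j, i ≤ j → j < p → ¬ ms <+: cs.drop j) →
    pvOccs cs ms i = p :: pvOccs cs ms (p + 1) := by
  intro i
  fun_induction pvOccs cs ms i with
  | case1 i hle ih =>
    intro hip hmin
    rcases Nat.lt_or_ge i p with hlt | hge
    · have htake : ¬ (cs.drop i).take ms.length = ms := by
        intro he
        exact hmin i le_rfl hlt (he ▸ List.take_prefix ms.length (cs.drop i))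
      have := ih (by omega) (fun j h1 h2 => hmin j (by omega) h2)
      simp [htake, this]
    · have hi : i = p := le_antisymm hip hge
      subst hi
      have htake : (cs.drop i).take ms.length = ms := (List.prefix_iff_eq_take.mp hp).symm
      simp [htake]
  | case2 i hle =>
    intro hip hmin
    omega

theorem pvFindLoop_eq (cs ms : List Char) (st : Int) :
    ∀ index acc, pvFindLoop cs ms st acc index =
      acc ++ (pvOccs cs ms index).map
        (fun (j : Nat) => (st + (j : Int), st + (j : Int) + (ms.length : Int))) := by
  intro index acc
  fun_induction pvFindLoop cs ms st acc index with
  | case1 acc index hle hr =>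
    rw [pvOccs_nil cs ms index
      ((PySem.Chars.findFrom_natCast_eq_neg_one_iff cs ms index hle).mp hr)]
    simp
  | case2 acc index hle hr ih =>
    obtain ⟨h1, h2, h3⟩ := PySem.Chars.findFrom_natCast_spec cs ms index hle hr
    set r := PySem.Chars.findFrom cs ms (index : Int) none with hrdef
    have hr0 : (r.toNat : Int) = r := Int.toNat_of_nonneg (by omega)
    have hplen : r.toNat + ms.length ≤ cs.length := by
      rcases eq_or_ne ms [] with he | he
      · subst he
        simp only [List.length_nil, Nat.add_zero]
        by_contra hgt
        exact h3 index le_rfl (by omega) (List.nil_prefix)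
      · have hl := h2.length_le
        simp only [List.length_drop] at hl
        have h0 : 0 < ms.length := List.length_pos_iff.mpr he
        omega
    have hocc : pvOccs cs ms index = r.toNat :: pvOccs cs ms (r.toNat + 1) :=
      pvOccs_cons cs ms r.toNat hplen h2 index (by omega) h3
    rw [ih, hocc]
    simp [hr0]
  | case3 acc index hle =>
    have h0 : pvOccs cs ms index = [] := by
      rw [pvOccs, if_neg (by omega)]
    simp [h0]

theorem pvOccs_filter (cs ms : List Char) :
    ∀ i, pvOccs cs ms i =
      (List.range' i (cs.length + 1 - ms.length - i)).filter
        (fun j => decide ((cs.drop j).take ms.length = ms)) := by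
  intro i
  fun_induction pvOccs cs ms i with
  | case1 i hle ih =>
    have hn : cs.length + 1 - ms.length - i = (cs.length + 1 - ms.length - (i + 1)) + 1 := by
      omega
    rw [hn, List.range'_succ, List.filter_cons, ih]
    by_cases htake : (cs.drop i).take ms.length = ms <;> simp [htake]
  | case2 i hle =>
    have hn : cs.length + 1 - ms.length - i = 0 := by omega
    rw [hn]
    rfl

-- every 5-mer equal to one of the 12 motifs passes the positional RRACH test
theorem pvRR_of_motif (cs : List Char) (i : Nat) (m : String) (hm : m ∈ pvMotifs)
    (hlen : i + 5 ≤ cs.length) (hsub : (cs.drop i).take 5 = m.toList) :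
    pvRR cs i = true := by
  have hget : ∀ k, k < 5 → cs.getD (i + k) ' ' = ((cs.drop i).take 5).getD k ' ' := by
    intro k hk
    have h1 : i + k < cs.length := by omega
    have h2 : k < ((cs.drop i).take 5).length := by
      simp only [List.length_take, List.length_drop]
      omega
    rw [List.getD_eq_getElem _ _ h1, List.getD_eq_getElem _ _ h2,
      List.getElem_take, List.getElem_drop]
  have h0 := hget 0 (by omega); have h1 := hget 1 (by omega)
  have h2 := hget 2 (by omega); have h3 := hget 3 (by omega)
  have h4 := hget 4 (by omega)
  simp only [Nat.add_zero] at h0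
  unfold pvRR
  rw [h0, h1, h2, h3, h4, hsub]
  fin_cases hm <;> decide

theorem pvMotif_len (m : String) (hm : m ∈ pvMotifs) : m.toList.length = 5 := by
  fin_cases hm <;> decide

-- per-ORF, per-motif: A's find loop produces exactly B's bucket for that motif
theorem pvPerMotif (cs : List Char) (st : Int) (m : String) (hm : m ∈ pvMotifs)
    (mc : List (Int × Int)) :
    pvFindLoop cs m.toList st mc 0 =
      List.foldl (fun mc3 p => if p.1 == m.toList then mc3 ++ [p.2] else mc3) mc
        (((List.range (cs.length - 4)).foldl (fun h i =>
            if pvRR cs i then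
              h ++ [((cs.drop i).take 5, (st + (i : Int), st + (i : Int) + 5))]
            else h) [])) := by
  have hlen5 := pvMotif_len m hm
  rw [PySem.List.foldl_append_if (fun i => pvRR cs i)
    (fun i => ((cs.drop i).take 5, (st + (i : Int), st + (i : Int) + 5)))]
  rw [PySem.List.foldl_append_if (fun p : List Char × (Int × Int) => p.1 == m.toList)
    (fun p : List Char × (Int × Int) => p.2)]
  rw [List.nil_append, List.filter_map, List.map_map, List.filter_filter]
  rw [pvFindLoop_eq, pvOccs_filter, hlen5]
  have hrange : List.range' 0 (cs.length + 1 - 5 - 0) = List.range (cs.length - 4) := by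
    have h : cs.length + 1 - 5 - 0 = cs.length - 4 := by omega
    rw [h, List.range_eq_range']
  rw [hrange]
  refine congrArg (fun X => mc ++ X) ?_
  have hfil : List.filter
      (fun a => ((fun p : List Char × (Int × Int) => p.1 == m.toList) ∘
        (fun i => ((cs.drop i).take 5, (st + (i : Int), st + (i : Int) + 5)))) a && pvRR cs a)
      (List.range (cs.length - 4)) =
      List.filter (fun j => decide ((cs.drop j).take 5 = m.toList))
        (List.range (cs.length - 4)) := by
    refine List.filter_congr ?_
    intro i hi
    have hilt : i < cs.length - 4 := List.mem_range.mp hi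
    have hle : i + 5 ≤ cs.length := by omega
    simp only [Function.comp]
    by_cases hsub : (cs.drop i).take 5 = m.toList
    · simp [hsub, pvRR_of_motif cs i m hm hle hsub]
    · simp [hsub]
  rw [hfil]
  refine List.map_congr_left ?_
  intro i hi
  simp

theorem pvPerOrf (c : Int × Int × String) (mc : List (Int × Int)) :
    pvMotifs.foldl (fun mc2 m => pvFindLoop c.2.2.toList m.toList c.1 mc2 0) mc =
      (let cs := c.2.2.toList
       let st := c.1
       let hits : List (List Char × (Int × Int)) :=
         (List.range (cs.length - 4)).foldl (fun h i =>
           if pvRR cs i then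
             h ++ [((cs.drop i).take 5, (st + (i : Int), st + (i : Int) + 5))]
           else h) []
       pvMotifs.foldl (fun mc2 m =>
         hits.foldl (fun mc3 p => if p.1 == m.toList then mc3 ++ [p.2] else mc3) mc2) mc) := by
  refine PySem.List.foldl_congr_mem pvMotifs _ _ mc ?_
  intro acc m hm
  exact pvPerMotif c.2.2.toList c.1 m hm acc

-- ===== VERDICT (by name: the statement is the Claim_ definition above) =====
theorem find_m6_motifs_spec : Claim_equal_find_m6_motifs := by
  intro orfs_data _ _
  unfold Spec_find_m6_motifs find_m6_motifs find_m6_motifs_alt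
  exact PySem.List.foldl_congr_mem orfs_data _ _ [] (fun acc c _ => pvPerOrf c acc)
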